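-- pv_equiv track=rewrite | github.com/maximilianogomez/python | TP 7/7.10.py | concatenacion2
-- ===== SOURCE A (Python) =====
-- def concatenacion2(lista1,lista2):
--     #creo una lista concatenacion2
--     conc2 = []
--     numinverso = 0
--     for i in range(len(lista1)):
--         #si el valor es par lo agrego
--         if lista1[i] % 2 == 0:
--             conc2.append(lista1[i])
--     for j in range(len(lista2)):
--         #analizo los valores pares de B
--         if lista2[j] % 2 == 0:
--             #guardo el valor de la lista para no perder el valor
--             aux = lista2[j]
--             #revierto el valor par de B
--             while lista2[j] != 0:
--                 dig = lista2[j] % 10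
--                 lista2[j] //= 10
--                 numinverso = (numinverso * 10) + dig
--             #llamo a la funcion auxiliar para devolverle el valor original a lista2[j]
--             lista2[j] = aux
--             #agrego el inverso
--             if numinverso == lista2[j]:
--                 #si el numero solo tiene un digito lo multiplico por 10 (ej: 02 , invertido quedaría 20)
--                numinverso *= 10
--                conc2.append(numinverso)
--             else:
--                 conc2.append(numinverso)
--             numinverso = 0
--     return conc2
-- ===== SOURCE B (Python) =====
-- def concatenacion2(lista1, lista2):
--     def rev(n):
--         # positional-weight reversal: find the weight of the most significant
--         # digit, then place each low digit at its final (descending) weight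
--         p = 1
--         while 10 * p <= n:
--             p *= 10
--         r = 0
--         while n:
--             r += (n % 10) * p
--             n //= 10
--             p //= 10
--         return r
--
--     out = [x for x in lista1 if x % 2 == 0]
--     for n in lista2:
--         if n % 2 == 0:
--             r = rev(n)
--             out.append(r * 10 if r == n else r)
--     return out
-- ===== Notes on version B (the rewrite author's own statement) =====
-- stated objective: alternative
-- what changed: B filters the evens of lista1 with a comprehension and reverses each even of lista2 by first computing the weight of its most significant digit and then placing each low digit at its final descending positional weight (sum of digit*10^k), instead of A's index loops with in-place mutation of lista2 and a Horner-style accumulator shifted at every step; the palindrome*10 case is kept.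
import Mathlib
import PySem

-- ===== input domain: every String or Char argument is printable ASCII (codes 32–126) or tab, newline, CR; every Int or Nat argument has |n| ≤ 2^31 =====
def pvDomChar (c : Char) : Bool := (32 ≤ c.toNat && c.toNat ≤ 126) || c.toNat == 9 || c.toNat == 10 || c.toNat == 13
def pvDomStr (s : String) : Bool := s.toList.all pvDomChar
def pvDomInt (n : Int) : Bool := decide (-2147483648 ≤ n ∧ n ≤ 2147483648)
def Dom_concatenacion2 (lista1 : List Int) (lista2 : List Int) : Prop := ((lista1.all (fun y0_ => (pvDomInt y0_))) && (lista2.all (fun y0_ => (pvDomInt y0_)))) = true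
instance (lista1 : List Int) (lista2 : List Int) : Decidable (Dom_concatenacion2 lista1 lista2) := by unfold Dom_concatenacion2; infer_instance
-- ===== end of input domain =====

-- B replaces A's index loops (with in-place mutation of lista2, restored before use) and
-- Horner-accumulator digit reversal by a comprehension over lista1 plus a positional-weight
-- reversal (most-significant weight first, each digit placed at its final power of ten);
-- equivalence is about the RETURN value (A's mutation of lista2 is undone before A returns).

-- ===== PORT A =====
-- the 'while lista2[j] != 0' loop: state (lista2[j], numinverso); fuel m.natAbs+1 only makes
-- the recursion total, it is never exhausted on the inputs admitted by Pre_
def pvRevA : Nat → Int → Int → Int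
  | 0, _, acc => acc
  | f + 1, m, acc =>
      if m ≠ 0 then pvRevA f (PySem.Int.floordiv m 10) (acc * 10 + PySem.Int.mod m 10) else acc

def concatenacion2 (lista1 : List Int) (lista2 : List Int) : List Int :=
  -- for i in range(len(lista1)): if lista1[i] % 2 == 0: conc2.append(lista1[i])
  let conc2 : List Int :=
    (PySem.List.pyRange 0 (PySem.List.len lista1)).foldl
      (fun acc i =>
        if PySem.Int.mod (PySem.List.pyGetD lista1 i 0) 2 = 0 then
          acc ++ [PySem.List.pyGetD lista1 i 0]
        else acc) []
  -- for j in range(len(lista2)): …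
  (PySem.List.pyRange 0 (PySem.List.len lista2)).foldl
    (fun acc j =>
      let v := PySem.List.pyGetD lista2 j 0
      if PySem.Int.mod v 2 = 0 then
        let numinverso := pvRevA (v.natAbs + 1) v 0
        if numinverso = v then acc ++ [numinverso * 10] else acc ++ [numinverso]
      else acc) conc2

-- ===== PORT B =====
-- 'while 10 * p <= n: p *= 10'; fuel n.natAbs+1 only makes the recursion total
def pvPowLoop : Nat → Int → Int → Int
  | 0, _, p => p
  | f + 1, n, p => if 10 * p ≤ n then pvPowLoop f n (p * 10) else p

-- 'while n: r += (n % 10) * p; n //= 10; p //= 10'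
def pvPlaceLoop : Nat → Int → Int → Int → Int
  | 0, _, _, r => r
  | f + 1, n, p, r =>
      if n ≠ 0 then
        pvPlaceLoop f (PySem.Int.floordiv n 10) (PySem.Int.floordiv p 10)
          (r + PySem.Int.mod n 10 * p)
      else r

def pvRevB (n : Int) : Int :=
  let p := pvPowLoop (n.natAbs + 1) n 1
  pvPlaceLoop (n.natAbs + 1) n p 0

def concatenacion2_alt (lista1 : List Int) (lista2 : List Int) : List Int :=
  lista2.foldl
    (fun out n =>
      if PySem.Int.mod n 2 = 0 then
        let r := pvRevB n
        out ++ [if r = n then r * 10 else r]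
      else out)
    (lista1.filter (fun x => decide (PySem.Int.mod x 2 = 0)))

-- ===== PRECONDITION & SPEC =====
-- Pre_ excludes lista2 containing a negative even element: there A's 'while lista2[j] != 0'
-- never terminates (floor division tends to -1), so A returns on no such input (B does not
-- return there either).
def Pre_concatenacion2 (lista1 : List Int) (lista2 : List Int) : Prop :=
  ∀ x ∈ lista2, PySem.Int.mod x 2 = 0 → 0 ≤ x
instance (lista1 : List Int) (lista2 : List Int) : Decidable (Pre_concatenacion2 lista1 lista2) := by unfold Pre_concatenacion2; infer_instance

def pvWitness_concatenacion2 : List Int × List Int := ([1, 2, -4, 7], [0, 3, 24, 120, -5])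

def Spec_concatenacion2 (lista1 : List Int) (lista2 : List Int) (out : List Int) : Prop := out = concatenacion2_alt lista1 lista2
instance (lista1 : List Int) (lista2 : List Int) (out : List Int) : Decidable (Spec_concatenacion2 lista1 lista2 out) := by unfold Spec_concatenacion2; infer_instance

-- ===== CLAIM (what is proved, stated in full; the proofs are below) =====
def Claim_equal_concatenacion2 : Prop := ∀ (lista1 : List Int) (lista2 : List Int), Dom_concatenacion2 lista1 lista2 → Pre_concatenacion2 lista1 lista2 → Spec_concatenacion2 lista1 lista2 (concatenacion2 lista1 lista2)

-- ===== LEMMAS AND PROOFS =====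

-- Horner digit reversal, Nat level
def pvRevN (m acc : Nat) : Nat :=
  if m = 0 then acc else pvRevN (m / 10) (acc * 10 + m % 10)
  decreasing_by exact Nat.div_lt_self (Nat.pos_of_ne_zero (by assumption)) (by norm_num)

-- number of decimal digits (0 for 0)
def pvDL (m : Nat) : Nat :=
  if m = 0 then 0 else pvDL (m / 10) + 1
  decreasing_by exact Nat.div_lt_self (Nat.pos_of_ne_zero (by assumption)) (by norm_num)

-- the power loop, Nat level
def pvPowN (m p : Nat) : Nat :=
  if h : 10 * p ≤ m ∧ 1 ≤ p then pvPowN m (10 * p) else p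
  termination_by m - p
  decreasing_by omega

-- the placing loop, Nat level
def pvPlaceN (m p r : Nat) : Nat :=
  if m = 0 then r else pvPlaceN (m / 10) (p / 10) (r + m % 10 * p)
  decreasing_by exact Nat.div_lt_self (Nat.pos_of_ne_zero (by assumption)) (by norm_num)

lemma pvFd10 (m : Nat) : PySem.Int.floordiv (m : Int) 10 = ((m / 10 : Nat) : Int) := by
  exact_mod_cast PySem.Int.floordiv_natCast m 10

lemma pvMd10 (m : Nat) : PySem.Int.mod (m : Int) 10 = ((m % 10 : Nat) : Int) := by
  exact_mod_cast PySem.Int.mod_natCast m 10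

lemma pvRevA_eq_revN (f : Nat) : ∀ m acc : Nat, m < f →
    pvRevA f (m : Int) (acc : Int) = (pvRevN m acc : Int) := by
  induction f with
  | zero => intro m acc h; omega
  | succ f ih =>
    intro m acc h
    rw [pvRevA, pvRevN]
    by_cases hm : m = 0
    · simp [hm]
    · have hm' : ((m : Int) ≠ 0) := by exact_mod_cast hm
      rw [if_pos hm', if_neg hm]
      rw [pvFd10, pvMd10]
      have : (acc : Int) * 10 + ((m % 10 : Nat) : Int) = ((acc * 10 + m % 10 : Nat) : Int) := by
        push_cast; ring
      rw [this]
      have hlt : m / 10 < m := Nat.div_lt_self (Nat.pos_of_ne_zero hm) (by norm_num)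
      exact ih (m / 10) (acc * 10 + m % 10) (by omega)

lemma pvPowLoop_eq_powN (f : Nat) : ∀ m p : Nat, 1 ≤ p → m < f + p →
    pvPowLoop f (m : Int) (p : Int) = (pvPowN m p : Int) := by
  induction f with
  | zero =>
    intro m p hp h
    rw [pvPowLoop, pvPowN]
    have : ¬ (10 * p ≤ m ∧ 1 ≤ p) := by omega
    simp [this]
  | succ f ih =>
    intro m p hp h
    rw [pvPowLoop, pvPowN]
    by_cases hle : 10 * p ≤ m
    · have h1 : (10 : Int) * (p : Int) ≤ (m : Int) := by exact_mod_cast hle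
      simp only [h1, if_pos, hle, hp, and_true, dif_pos]
      have : (p : Int) * 10 = ((10 * p : Nat) : Int) := by push_cast; ring
      rw [this]
      exact ih m (10 * p) (by omega) (by omega)
    · have h1 : ¬ ((10 : Int) * (p : Int) ≤ (m : Int)) := by exact_mod_cast hle
      have : ¬ (10 * p ≤ m ∧ 1 ≤ p) := by omega
      simp [h1, this]

lemma pvPlaceLoop_eq_placeN (f : Nat) : ∀ m p r : Nat, m < f →
    pvPlaceLoop f (m : Int) (p : Int) (r : Int) = (pvPlaceN m p r : Int) := by
  induction f with
  | zero => intro m p r h; omega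
  | succ f ih =>
    intro m p r h
    rw [pvPlaceLoop, pvPlaceN]
    by_cases hm : m = 0
    · simp [hm]
    · have hm' : ((m : Int) ≠ 0) := by exact_mod_cast hm
      rw [if_pos hm', if_neg hm]
      rw [pvFd10 m, pvFd10 p, pvMd10 m]
      have : (r : Int) + ((m % 10 : Nat) : Int) * (p : Int) = ((r + m % 10 * p : Nat) : Int) := by
        push_cast; ring
      rw [this]
      have hlt : m / 10 < m := Nat.div_lt_self (Nat.pos_of_ne_zero hm) (by norm_num)
      exact ih (m / 10) (p / 10) (r + m % 10 * p) (by omega)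

-- Horner shift: revN with accumulator a = a * 10^(digit count) + revN with accumulator 0
lemma pvRevN_acc (m : Nat) : ∀ a : Nat, pvRevN m a = a * 10 ^ pvDL m + pvRevN m 0 := by
  induction m using Nat.strong_induction_on with
  | _ m ih =>
    intro a
    by_cases hm : m = 0
    · subst hm
      have h1 : pvRevN 0 a = a := by rw [pvRevN]; rfl
      have h2 : pvRevN 0 0 = 0 := by rw [pvRevN]; rfl
      have h3 : pvDL 0 = 0 := by rw [pvDL]; rfl
      rw [h1, h2, h3]; ring
    · have hlt : m / 10 < m := Nat.div_lt_self (Nat.pos_of_ne_zero hm) (by norm_num)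
      have hdl : pvDL m = pvDL (m / 10) + 1 := by rw [pvDL, if_neg hm]
      have hstep : ∀ b : Nat, pvRevN m b = pvRevN (m / 10) (b * 10 + m % 10) := by
        intro b; rw [pvRevN, if_neg hm]
      have hacc : pvRevN (m / 10) (0 * 10 + m % 10)
          = (0 * 10 + m % 10) * 10 ^ pvDL (m / 10) + pvRevN (m / 10) 0 := ih _ hlt _
      calc pvRevN m a = pvRevN (m / 10) (a * 10 + m % 10) := hstep a
        _ = (a * 10 + m % 10) * 10 ^ pvDL (m / 10) + pvRevN (m / 10) 0 := ih _ hlt _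
        _ = a * 10 ^ pvDL m + pvRevN (m / 10) (0 * 10 + m % 10) := by
            rw [hacc, hdl]; ring
        _ = a * 10 ^ pvDL m + pvRevN m 0 := by rw [← hstep 0]

lemma pvPowN_eq (m : Nat) : ∀ p : Nat, 1 ≤ p → pvPowN m p = p * 10 ^ (pvDL (m / p) - 1) := by
  intro p hp
  induction hmp : m - p using Nat.strong_induction_on generalizing p with
  | _ k ih =>
    subst hmp
    rw [pvPowN]
    by_cases hle : 10 * p ≤ m
    · rw [dif_pos ⟨hle, hp⟩, ih (m - 10 * p) (by omega) (10 * p) (by omega) rfl]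
      have h10 : m / (10 * p) = m / p / 10 := by
        rw [Nat.div_div_eq_div_mul, Nat.mul_comm]
      have hge : 10 ≤ m / p := (Nat.le_div_iff_mul_le (by omega)).mpr (by omega)
      have hdl : pvDL (m / p) = pvDL (m / p / 10) + 1 := by
        rw [pvDL, if_neg (by omega)]
      have h1 : 1 ≤ pvDL (m / p / 10) := by
        rw [pvDL]
        split <;> omega
      rw [h10, hdl]
      have heq : pvDL (m / p / 10) + 1 - 1 = (pvDL (m / p / 10) - 1) + 1 := by omega
      rw [heq, pow_succ]
      ring
    · rw [dif_neg (by omega)]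
      have hsmall : m / p < 10 := (Nat.div_lt_iff_lt_mul (by omega)).mpr (by omega)
      have hdl0 : pvDL (m / p) - 1 = 0 := by
        by_cases hz : m / p = 0
        · rw [pvDL, if_pos hz]
        · rw [pvDL, if_neg hz]
          have hz10 : m / p / 10 = 0 := Nat.div_eq_of_lt hsmall
          rw [hz10, pvDL]
          rfl
      rw [hdl0, pow_zero, Nat.mul_one]

-- the placing loop started at the most-significant weight computes the Horner reversal
lemma pvPlaceN_eq_revN (m : Nat) : ∀ r : Nat, 1 ≤ m →
    pvPlaceN m (10 ^ (pvDL m - 1)) r = r + pvRevN m 0 := by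
  induction m using Nat.strong_induction_on with
  | _ m ih =>
    intro r hm
    have hstep : ∀ b : Nat, pvRevN m b = pvRevN (m / 10) (b * 10 + m % 10) := by
      intro b; rw [pvRevN, if_neg (by omega)]
    by_cases h10 : m < 10
    · have hdl : pvDL m = 1 := by
        rw [pvDL, if_neg (by omega)]
        have hz : m / 10 = 0 := by omega
        rw [hz, pvDL]; rfl
      have hdiv : m / 10 = 0 := by omega
      have hmod : m % 10 = m := by omega
      have hp0 : pvPlaceN 0 (1 / 10) (r + m % 10 * 1) = r + m % 10 * 1 := by rw [pvPlaceN]; rfl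
      have hr0 : pvRevN 0 (0 * 10 + m % 10) = 0 * 10 + m % 10 := by rw [pvRevN]; rfl
      rw [hdl, pow_zero, pvPlaceN, if_neg (by omega), hdiv, hp0,
        hstep 0, hdiv, hr0, hmod]
      ring
    · have hge : 10 ≤ m := by omega
      have hlt : m / 10 < m := Nat.div_lt_self (by omega) (by norm_num)
      have hdge : 1 ≤ m / 10 := by omega
      have hdl : pvDL m = pvDL (m / 10) + 1 := by rw [pvDL, if_neg (by omega)]
      have hdl1 : 1 ≤ pvDL (m / 10) := by
        rw [pvDL, if_neg (by omega)]; omega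
      have hpow : 10 ^ (pvDL m - 1) / 10 = 10 ^ (pvDL (m / 10) - 1) := by
        rw [hdl]
        have heq : pvDL (m / 10) + 1 - 1 = (pvDL (m / 10) - 1) + 1 := by omega
        rw [heq, pow_succ, Nat.mul_div_cancel _ (by norm_num)]
      rw [pvPlaceN, if_neg (by omega), hpow, ih _ hlt _ hdge,
        hstep 0, pvRevN_acc (m / 10) (0 * 10 + m % 10), hdl]
      have heq : pvDL (m / 10) + 1 - 1 = pvDL (m / 10) := by omega
      rw [heq]
      ring

-- per-element agreement of the two reversals, on nonnegative n
lemma pvRevB_eq_revA (n : Int) (hn : 0 ≤ n) :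
    pvRevA (n.natAbs + 1) n 0 = pvRevB n := by
  obtain ⟨m, rfl⟩ : ∃ m : Nat, n = (m : Int) := ⟨n.toNat, (Int.toNat_of_nonneg hn).symm⟩
  have hab : (m : Int).natAbs = m := Int.natAbs_natCast m
  rw [pvRevB, hab]
  have h0 : ((0 : Nat) : Int) = (0 : Int) := rfl
  rw [← h0, pvRevA_eq_revN (m + 1) m 0 (by omega)]
  have h1 : ((1 : Nat) : Int) = (1 : Int) := rfl
  rw [← h1, pvPowLoop_eq_powN (m + 1) m 1 (by omega) (by omega)]
  rw [pvPlaceLoop_eq_placeN (m + 1) m (pvPowN m 1) 0 (by omega)]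
  congr 1
  by_cases hm : m = 0
  · subst hm
    rw [pvPlaceN, if_pos rfl, pvRevN, if_pos rfl]
  · rw [pvPowN_eq m 1 le_rfl, Nat.div_one, one_mul,
      pvPlaceN_eq_revN m 0 (by omega), Nat.zero_add]

-- ===== VERDICT (by name: the statement is the Claim_ definition above) =====
theorem concatenacion2_spec : Claim_equal_concatenacion2 := by
  intro lista1 lista2 _hdom hpre
  unfold Spec_concatenacion2
  simp only [concatenacion2, concatenacion2_alt]
  rw [PySem.List.foldl_pyRange_pyGetD lista1 0
        (fun acc x => if PySem.Int.mod x 2 = 0 then acc ++ [x] else acc) [] le_rfl,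
      PySem.List.foldl_pyRange_pyGetD lista2 0
        (fun acc v => if PySem.Int.mod v 2 = 0 then
            (if pvRevA (v.natAbs + 1) v 0 = v then acc ++ [pvRevA (v.natAbs + 1) v 0 * 10]
             else acc ++ [pvRevA (v.natAbs + 1) v 0])
          else acc) _ le_rfl]
  simp only [Int.toNat_zero, List.drop_zero]
  rw [PySem.List.foldl_append_ite_eq_filter (fun x => PySem.Int.mod x 2 = 0) lista1 []]
  rw [List.nil_append]
  apply PySem.List.foldl_congr_mem
  intro acc x hx
  by_cases hev : PySem.Int.mod x 2 = 0
  · rw [if_pos hev, if_pos hev, pvRevB_eq_revA x (hpre x hx hev)]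
    split_ifs <;> rfl
  · rw [if_neg hev, if_neg hev]
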